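-- pv_equiv track=rewrite | github.com/AllenRyu1018/Senior-Project | ACES.py | IntegerDigits
-- ===== SOURCE A (Python) =====
-- def IntegerDigits(m, k):
--     temp = bin(m)
--     digits = [int(d) for d in str(temp)[2:]]
--
--     length = len(digits)
--
--     if length > k:
--         digits = digits[length - k: length]
--     elif length < k:
--         for _ in range(k - length):
--             digits.insert(0, 0)
--
--     return digits
-- ===== SOURCE B (Python) =====
-- def IntegerDigits(m, k):
--     return [(m >> i) & 1 for i in range(k - 1, -1, -1)]
-- ===== Notes on version B (the rewrite author's own statement) =====
-- stated objective: faster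
-- what changed: Replaces the bin()+string-parse pipeline with its branch on length (truncating slice vs. quadratic insert(0,0) padding loop) by direct arithmetic bit extraction over the k wanted positions, so truncation and zero-padding fall out of one O(k) expression with no string, no slice and no branch.
import Mathlib
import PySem

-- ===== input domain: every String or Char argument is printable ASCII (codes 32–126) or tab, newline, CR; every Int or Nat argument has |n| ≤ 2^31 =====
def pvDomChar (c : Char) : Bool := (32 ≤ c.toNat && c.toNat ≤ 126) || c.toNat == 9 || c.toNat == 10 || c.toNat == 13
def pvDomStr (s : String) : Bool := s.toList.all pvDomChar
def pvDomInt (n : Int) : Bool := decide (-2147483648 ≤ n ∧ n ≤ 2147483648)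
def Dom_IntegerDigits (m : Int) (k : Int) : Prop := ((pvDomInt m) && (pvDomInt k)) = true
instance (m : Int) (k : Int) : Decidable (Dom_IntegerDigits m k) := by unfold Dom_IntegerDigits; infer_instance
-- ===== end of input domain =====

-- B replaces A's bin()+string-parse pipeline (with its truncate-slice / insert(0,0)-pad branch)
-- by direct arithmetic extraction of the k wanted bits (idiomatic; no string, no slice, no branch).

-- ===== PORT A =====
-- binary digit characters of a natural number, most significant first ([] for 0)
def pvNatBinChars : Nat → List Char
  | 0 => []
  | n + 1 => pvNatBinChars ((n + 1) / 2) ++ [if (n + 1) % 2 == 1 then '1' else '0']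
decreasing_by omega

-- Python's bin(m): sign, then '0b', then the binary digits
def pvPyBin (m : Int) : String :=
  if m < 0 then String.ofList ('-' :: '0' :: 'b' :: pvNatBinChars (-m).toNat)
  else if m = 0 then "0b0"
  else String.ofList ('0' :: 'b' :: pvNatBinChars m.toNat)

-- int(d) for one character; Python raises ValueError where ofStr? is none (reachable only
-- for m < 0, which Pre_IntegerDigits excludes), the port defaults to 0 there
def pvIntOfDigitChar (d : Char) : Int := (PySem.Int.ofStr? (String.ofList [d])).getD 0

def IntegerDigits (m : Int) (k : Int) : List Int :=
  let temp := pvPyBin m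
  let digits := (PySem.Str.slice temp (some 2) none).toList.map pvIntOfDigitChar
  let length : Int := digits.length
  if length > k then
    PySem.List.slice digits (some (length - k)) (some length)
  else if length < k then
    (PySem.List.pyRange 0 (k - length) 1).foldl (fun acc _ => PySem.List.insert acc 0 0) digits
  else digits

-- ===== PORT B =====
-- (m >> i) & 1 is ported as floor-division by 2^i modulo 2, exact for every int since i ≥ 0
def IntegerDigits_alt (m : Int) (k : Int) : List Int :=
  (PySem.List.pyRange (k - 1) (-1) (-1)).map
    (fun i => PySem.Int.mod (PySem.Int.floordiv m (2 ^ i.toNat)) 2)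

-- ===== PRECONDITION & SPEC =====
-- A raises ValueError for negative m (it parses the 'b' of '-0b...'); Pre_ excludes exactly those.
def Pre_IntegerDigits (m : Int) (k : Int) : Prop := 0 ≤ m
instance (m : Int) (k : Int) : Decidable (Pre_IntegerDigits m k) := by unfold Pre_IntegerDigits; infer_instance
def pvWitness_IntegerDigits : Int × Int := (5, 3)

def Spec_IntegerDigits (m : Int) (k : Int) (out : List Int) : Prop := out = IntegerDigits_alt m k
instance (m : Int) (k : Int) (out : List Int) : Decidable (Spec_IntegerDigits m k out) := by unfold Spec_IntegerDigits; infer_instance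

-- ===== CLAIM (what is proved, stated in full; the proofs are below) =====
def Claim_equal_IntegerDigits : Prop := ∀ (m : Int) (k : Int), Dom_IntegerDigits m k → Pre_IntegerDigits m k → Spec_IntegerDigits m k (IntegerDigits m k)
-- ===== LEMMAS AND PROOFS =====

-- the digit values of bin(n) (MSB first, [] for 0)
def pvBL : Nat → List Int
  | 0 => []
  | n + 1 => pvBL ((n + 1) / 2) ++ [(((n + 1) % 2 : Nat) : Int)]
decreasing_by omega

-- the digit list A actually builds for m = n ≥ 0
def pvDG (n : Nat) : List Int := if n = 0 then [0] else pvBL n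

-- canonical value: the K low bits of n, MSB first
def pvC (n : Nat) : Nat → List Int
  | 0 => []
  | K + 1 => ((n / 2 ^ K % 2 : Nat) : Int) :: pvC n K

theorem pvIntOfDigitChar_one : pvIntOfDigitChar '1' = 1 := by decide
theorem pvIntOfDigitChar_zero : pvIntOfDigitChar '0' = 0 := by decide

theorem pvC_length (n K : Nat) : (pvC n K).length = K := by
  induction K with
  | zero => rfl
  | succ K ih => simp [pvC, ih]

theorem pv_parse (n : Nat) : (pvNatBinChars n).map pvIntOfDigitChar = pvBL n := by
  fun_induction pvNatBinChars n with
  | case1 => simp [pvBL]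
  | case2 n ih =>
    rw [pvBL]
    rcases Nat.mod_two_eq_zero_or_one (n + 1) with h | h <;>
      simp [h, ih, pvIntOfDigitChar_one, pvIntOfDigitChar_zero]

theorem pvC_append (n K : Nat) :
    pvC n (K + 1) = pvC (n / 2) K ++ [((n % 2 : Nat) : Int)] := by
  induction K with
  | zero => simp [pvC]
  | succ K ih =>
    rw [pvC, ih, pvC]
    have : n / 2 / 2 ^ K = n / 2 ^ (K + 1) := by
      rw [Nat.div_div_eq_div_mul, pow_succ, mul_comm]
    simp [this]

theorem pvBL_main (n : Nat) (h : 1 ≤ n) :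
    1 ≤ (pvBL n).length ∧ n < 2 ^ (pvBL n).length ∧
      ∀ K, K ≤ (pvBL n).length → (pvBL n).drop ((pvBL n).length - K) = pvC n K := by
  induction n using Nat.strong_induction_on with
  | _ n ih =>
    match n, h with
    | 1, _ =>
      have h1 : pvBL 1 = [1] := by simp [pvBL]
      rw [h1]
      refine ⟨by simp, by simp, ?_⟩
      intro K hK
      simp at hK
      interval_cases K <;> decide
    | (n + 2), _ =>
      have h2 : 1 ≤ (n + 2) / 2 := by omega
      obtain ⟨hL, hlt, hdrop⟩ := ih ((n + 2) / 2) (by omega) h2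
      have hbl : pvBL (n + 2) = pvBL ((n + 2) / 2) ++ [(((n + 2) % 2 : Nat) : Int)] := by
        rw [pvBL]
      set L' := (pvBL ((n + 2) / 2)).length with hL'
      have hlen : (pvBL (n + 2)).length = L' + 1 := by
        rw [hbl]; simp only [List.length_append, List.length_cons, List.length_nil]; omega
      refine ⟨by omega, ?_, ?_⟩
      · rw [hlen, pow_succ]; omega
      · intro K hK
        match K with
        | 0 =>
          rw [hlen, Nat.sub_zero, hbl]
          have hh : (pvBL ((n + 2) / 2) ++ [(((n + 2) % 2 : Nat) : Int)]).length = L' + 1 := by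
            simp only [List.length_append, List.length_cons, List.length_nil]; omega
          rw [← hh, List.drop_length]; rfl
        | (K + 1) =>
          rw [hlen] at hK ⊢
          have hKL : K ≤ L' := by omega
          rw [hbl, pvC_append]
          have : L' + 1 - (K + 1) = L' - K := by omega
          rw [this, List.drop_append_of_le_length (by omega), hdrop K hKL]

theorem pvDG_main (n : Nat) :
    1 ≤ (pvDG n).length ∧ n < 2 ^ (pvDG n).length ∧
      ∀ K, K ≤ (pvDG n).length → (pvDG n).drop ((pvDG n).length - K) = pvC n K := by
  by_cases h : n = 0
  · subst h
    refine ⟨by simp [pvDG], by simp [pvDG], ?_⟩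
    intro K hK
    simp [pvDG] at hK ⊢
    interval_cases K <;> decide
  · have := pvBL_main n (by omega)
    simpa [pvDG, h] using this

theorem pvC_pad (n t : Nat) (h : n < 2 ^ (pvDG n).length) :
    pvC n ((pvDG n).length + t) = List.replicate t (0 : Int) ++ pvC n (pvDG n).length := by
  induction t with
  | zero => simp
  | succ t ih =>
    have hdiv : n / 2 ^ ((pvDG n).length + t) = 0 :=
      Nat.div_eq_of_lt (lt_of_lt_of_le h (Nat.pow_le_pow_right (by omega) (by omega)))
    have : (pvDG n).length + (t + 1) = ((pvDG n).length + t) + 1 := by omega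
    rw [this, pvC, hdiv, ih]
    simp [List.replicate_succ]

theorem pv_slice2 (l : List Char) (a b : Char) :
    (PySem.Str.slice (String.ofList (a :: b :: l)) (some 2) none).toList = l := by
  simp [PySem.Str.slice, PySem.Chars.slice, PySem.List.slice]

theorem pv_digits (m : Int) (h : 0 ≤ m) :
    (PySem.Str.slice (pvPyBin m) (some 2) none).toList.map pvIntOfDigitChar = pvDG m.toNat := by
  rcases eq_or_lt_of_le h with h0 | hpos
  · rw [← h0]; decide
  · have hm : ¬ (m < 0) := by omega
    have hm0 : ¬ (m = 0) := by omega
    rw [pvPyBin, if_neg hm, if_neg hm0, pv_slice2, pv_parse, pvDG,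
      if_neg (by omega : ¬ m.toNat = 0)]

theorem pv_foldl_insert (t : List Int) (acc : List Int) :
    t.foldl (fun acc _ => PySem.List.insert acc 0 0) acc
      = List.replicate t.length (0 : Int) ++ acc := by
  induction t generalizing acc with
  | nil => simp
  | cons x t ih =>
    rw [List.foldl_cons, ih, PySem.List.insert_zero]
    simp [List.replicate_succ']

theorem pv_head_bit (n K : Nat) :
    PySem.Int.mod (PySem.Int.floordiv (n : Int) ((2 : Int) ^ K)) 2
      = ((n / 2 ^ K % 2 : Nat) : Int) := by
  have h := PySem.Int.floordiv_natCast n (2 ^ K)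
  rw [show (((2 ^ K : Nat)) : Int) = (2 : Int) ^ K by push_cast; ring] at h
  rw [h, PySem.Int.mod_eq_emod_of_pos (by omega)]
  push_cast
  omega

theorem pv_alt_aux (K : Nat) (n : Nat) :
    (PySem.List.pyRange ((K : Int) - 1) (-1) (-1)).map
      (fun i => PySem.Int.mod (PySem.Int.floordiv (n : Int) (2 ^ i.toNat)) 2) = pvC n K := by
  induction K with
  | zero => rw [PySem.List.pyRange_neg_one_eq_nil (by omega)]; rfl
  | succ K ih =>
    have hc : (((K + 1 : Nat) : Int) - 1) = (K : Int) := by push_cast; ring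
    rw [hc, PySem.List.pyRange_neg_one_cons (by omega), List.map_cons]
    simp only [Int.toNat_natCast]
    rw [pv_head_bit, ih]
    rfl

theorem pv_alt_eq (m k : Int) (h : 0 ≤ m) :
    IntegerDigits_alt m k = pvC m.toNat k.toNat := by
  by_cases hk : k ≤ 0
  · have : k.toNat = 0 := by omega
    rw [this, IntegerDigits_alt, PySem.List.pyRange_neg_one_eq_nil (by omega)]
    rfl
  · have hkk : k = ((k.toNat : Nat) : Int) := by omega
    have hmm : m = ((m.toNat : Nat) : Int) := by omega
    rw [IntegerDigits_alt, hkk, hmm, pv_alt_aux]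
    congr 1

-- ===== VERDICT (by name: the statement is the Claim_ definition above) =====
theorem IntegerDigits_spec : Claim_equal_IntegerDigits := by
  intro m k _ hpre
  unfold Spec_IntegerDigits
  rw [pv_alt_eq m k hpre]
  have hd := pv_digits m hpre
  simp only [IntegerDigits, hd]
  obtain ⟨hL1, hlt, hdrop⟩ := pvDG_main m.toNat
  set n := m.toNat with hn
  set dg := pvDG n with hdg
  set L := dg.length with hLdef
  have hC : pvC n L = dg := by
    have h' := hdrop L le_rfl
    rw [Nat.sub_self, List.drop_zero] at h'
    exact h'.symm
  split_ifs with h1 h2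
  · -- ↑L > k : truncating slice
    rw [PySem.List.slice_toNat dg (a := (L : Int) - k) (b := (L : Int)) (by omega) (by omega)]
    by_cases hk : 0 ≤ k
    · have e1 : ((L : Int) - k).toNat = L - k.toNat := by omega
      rw [e1, show ((L : Int)).toNat - (L - k.toNat) = k.toNat by omega,
        hdrop k.toNat (by omega)]
      exact List.take_of_length_le (by rw [pvC_length])
    · have hkz : k.toNat = 0 := by omega
      have hdz : dg.drop ((L : Int) - k).toNat = [] :=
        List.drop_eq_nil_of_le (by omega)
      rw [hdz, hkz]
      simp [pvC]
  · -- ↑L < k : zero-padding loop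
    rw [pv_foldl_insert, PySem.List.length_pyRange_one]
    have ht : k.toNat = L + (k.toNat - L) := by omega
    rw [ht, pvC_pad n _ hlt, hC]
    have : (k - (L : Int) - 0).toNat = k.toNat - L := by omega
    rw [this]
  · -- ↑L = k
    have : k.toNat = L := by omega
    rw [this, hC]
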